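-- pv_equiv track=rewrite | github.com/PragnPatel/AI-ML-OCR | src/text_extraction.py | find_target_line_from_text
-- ===== SOURCE A (Python) =====
-- def find_target_line_from_text(raw_text, prefer_pattern=r'_1_'):
--     """
--     raw_text: string with multiple lines
--     preference logic:
--       1) exact match containing '_1_'
--       2) contains '_1'
--       3) any line containing digit '1' and length > 6
--       4) fallback to last non-empty line
--     """
--     lines = [ln.strip() for ln in raw_text.splitlines() if ln.strip()]
--     # 1
--     for ln in lines:
--         if '_1_' in ln:
--             return ln
--     # 2
--     for ln in lines:
--         if '_1' in ln:
--             return ln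
--     # 3
--     for ln in lines:
--         if '1' in ln and len(ln) > 6:
--             return ln
--     # 4 fallback
--     return lines[-1] if lines else None
-- ===== SOURCE B (Python) =====
-- def find_target_line_from_text(raw_text, prefer_pattern=r'_1_'):
--     """Single pass over the lines, keeping the first match of each tier."""
--     t1 = t2 = t3 = last = None
--     for ln in raw_text.splitlines():
--         s = ln.strip()
--         if not s:
--             continue
--         if t1 is None and '_1_' in s:
--             t1 = s
--         if t2 is None and '_1' in s:
--             t2 = s
--         if t3 is None and '1' in s and len(s) > 6:
--             t3 = s
--         last = s
--     if t1 is not None: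
--         return t1
--     if t2 is not None:
--         return t2
--     if t3 is not None:
--         return t3
--     return last
-- ===== Notes on version B (the rewrite author's own statement) =====
-- stated objective: faster
-- what changed: Replaced the four separate scans over the stripped line list with a single pass that records the first match of each priority tier and the last non-empty line, then returns the highest-priority one.
import Mathlib
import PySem

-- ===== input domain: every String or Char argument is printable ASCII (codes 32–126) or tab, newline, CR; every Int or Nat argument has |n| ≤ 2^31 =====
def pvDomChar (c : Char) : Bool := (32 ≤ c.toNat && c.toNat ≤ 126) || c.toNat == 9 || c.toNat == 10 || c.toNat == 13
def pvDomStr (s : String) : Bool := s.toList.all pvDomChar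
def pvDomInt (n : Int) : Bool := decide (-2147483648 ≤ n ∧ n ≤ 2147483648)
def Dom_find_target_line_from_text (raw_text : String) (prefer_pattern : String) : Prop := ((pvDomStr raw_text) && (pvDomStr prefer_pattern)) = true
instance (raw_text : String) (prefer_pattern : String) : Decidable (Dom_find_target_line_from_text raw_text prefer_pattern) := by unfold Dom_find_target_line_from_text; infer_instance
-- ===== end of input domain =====

-- B replaces A's four scans over the stripped line list with one pass that keeps
-- the first match of each tier and the last non-empty line (objective: faster).

-- ===== PORT A =====
-- lines = [ln.strip() for ln in raw_text.splitlines() if ln.strip()]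
def pvLinesA (raw_text : String) : List String :=
  ((PySem.Str.splitlines raw_text).filter
    (fun ln => !(PySem.Str.strip ln == ""))).map PySem.Str.strip

def find_target_line_from_text (raw_text : String) (prefer_pattern : String) : Option String :=
  -- 1
  match (pvLinesA raw_text).find? (fun ln => PySem.Str.isIn "_1_" ln) with
  | some ln => some ln
  | none =>
    -- 2
    match (pvLinesA raw_text).find? (fun ln => PySem.Str.isIn "_1" ln) with
    | some ln => some ln
    | none =>
      -- 3
      match (pvLinesA raw_text).find? (fun ln => PySem.Str.isIn "1" ln && decide (6 < PySem.Str.len ln)) with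
      | some ln => some ln
      | none =>
        -- 4 fallback: lines[-1] if lines else None
        PySem.List.pyGet? (pvLinesA raw_text) (-1)

-- ===== PORT B =====
-- the loop body of Source B: skip blank strips, set each tier only if still None, always set last
def pvStepB (st : Option String × Option String × Option String × Option String)
    (ln : String) : Option String × Option String × Option String × Option String :=
  let s := PySem.Str.strip ln
  if s == "" then st
  else
    (if st.1.isNone && PySem.Str.isIn "_1_" s then some s else st.1,
     if st.2.1.isNone && PySem.Str.isIn "_1" s then some s else st.2.1,
     if st.2.2.1.isNone && (PySem.Str.isIn "1" s && decide (6 < PySem.Str.len s)) then some s else st.2.2.1,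
     some s)

-- the trailing return chain of Source B
def pvChoose (st : Option String × Option String × Option String × Option String) : Option String :=
  match st.1 with
  | some t1 => some t1
  | none =>
    match st.2.1 with
    | some t2 => some t2
    | none =>
      match st.2.2.1 with
      | some t3 => some t3
      | none => st.2.2.2

def find_target_line_from_text_alt (raw_text : String) (prefer_pattern : String) : Option String :=
  pvChoose ((PySem.Str.splitlines raw_text).foldl pvStepB (none, none, none, none))

-- ===== PRECONDITION & SPEC =====
def Spec_find_target_line_from_text (raw_text : String) (prefer_pattern : String) (out : Option String) : Prop := out = find_target_line_from_text_alt raw_text prefer_pattern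
instance (raw_text : String) (prefer_pattern : String) (out : Option String) : Decidable (Spec_find_target_line_from_text raw_text prefer_pattern out) := by unfold Spec_find_target_line_from_text; infer_instance

-- ===== CLAIM (what is proved, stated in full; the proofs are below) =====
def Claim_equal_find_target_line_from_text : Prop := ∀ (raw_text : String) (prefer_pattern : String), Dom_find_target_line_from_text raw_text prefer_pattern → Spec_find_target_line_from_text raw_text prefer_pattern (find_target_line_from_text raw_text prefer_pattern)

-- ===== LEMMAS AND PROOFS =====

-- B's loop body on an already-stripped non-blank line
def pvStepG (st : Option String × Option String × Option String × Option String)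
    (s : String) : Option String × Option String × Option String × Option String :=
  (if st.1.isNone && PySem.Str.isIn "_1_" s then some s else st.1,
   if st.2.1.isNone && PySem.Str.isIn "_1" s then some s else st.2.1,
   if st.2.2.1.isNone && (PySem.Str.isIn "1" s && decide (6 < PySem.Str.len s)) then some s else st.2.2.1,
   some s)

theorem pvFoldB_eq (L : List String) (st : Option String × Option String × Option String × Option String) :
    L.foldl pvStepB st
      = (((L.filter (fun ln => !(PySem.Str.strip ln == ""))).map PySem.Str.strip).foldl pvStepG st) := by
  induction L generalizing st with
  | nil => rfl
  | cons ln rest ih =>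
      by_cases h : (PySem.Str.strip ln == "") = true
      · have hstep : pvStepB st ln = st := by simp [pvStepB, h]
        simp [List.filter_cons, h, hstep, ih]
      · have h' : (PySem.Str.strip ln == "") = false := by simpa using h
        have hstep : pvStepB st ln = pvStepG st (PySem.Str.strip ln) := by
          simp [pvStepB, pvStepG, h']
        simp [List.filter_cons, h', hstep, ih]

theorem pvGetLast?_cons (s : String) (rest : List String) :
    (s :: rest).getLast? = rest.getLast?.or (some s) := by
  cases rest with
  | nil => rfl
  | cons a l => simp [List.getLast?_cons]

theorem pvOrIteFind (c : String → Bool) (t : Option String) (s : String) (rest : List String) :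
    (if t.isNone && c s then some s else t).or (rest.find? c) = t.or ((s :: rest).find? c) := by
  cases t with
  | some a => simp
  | none => cases hc : c s <;> simp [hc]

theorem pvFoldG_spec (L : List String) (t1 t2 t3 last : Option String) :
    L.foldl pvStepG (t1, t2, t3, last)
      = (t1.or (L.find? (fun s => PySem.Str.isIn "_1_" s)),
         t2.or (L.find? (fun s => PySem.Str.isIn "_1" s)),
         t3.or (L.find? (fun s => PySem.Str.isIn "1" s && decide (6 < PySem.Str.len s))),
         L.getLast?.or last) := by
  induction L generalizing t1 t2 t3 last with
  | nil => simp
  | cons s rest ih =>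
      rw [List.foldl_cons]
      show List.foldl pvStepG
        (if t1.isNone && PySem.Str.isIn "_1_" s then some s else t1,
         if t2.isNone && PySem.Str.isIn "_1" s then some s else t2,
         if t3.isNone && (PySem.Str.isIn "1" s && decide (6 < PySem.Str.len s)) then some s else t3,
         some s) rest = _
      rw [ih, pvGetLast?_cons]
      simp only [Prod.mk.injEq]
      exact ⟨pvOrIteFind (fun s => PySem.Str.isIn "_1_" s) t1 s rest,
        pvOrIteFind (fun s => PySem.Str.isIn "_1" s) t2 s rest,
        pvOrIteFind (fun s => PySem.Str.isIn "1" s && decide (6 < PySem.Str.len s)) t3 s rest,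
        by cases rest.getLast? <;> simp⟩

-- ===== VERDICT (by name: the statement is the Claim_ definition above) =====
theorem find_target_line_from_text_spec : Claim_equal_find_target_line_from_text := by
  intro raw_text prefer_pattern _
  unfold Spec_find_target_line_from_text find_target_line_from_text find_target_line_from_text_alt
  rw [pvFoldB_eq, pvFoldG_spec]
  show _ = pvChoose
    (Option.none.or ((pvLinesA raw_text).find? (fun s => PySem.Str.isIn "_1_" s)),
     Option.none.or ((pvLinesA raw_text).find? (fun s => PySem.Str.isIn "_1" s)),
     Option.none.or ((pvLinesA raw_text).find? (fun s => PySem.Str.isIn "1" s && decide (6 < PySem.Str.len s))),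
     (pvLinesA raw_text).getLast?.or none)
  rw [PySem.List.pyGet?_neg_one]
  simp only [Option.none_or, Option.or_none]
  cases (pvLinesA raw_text).find? (fun s => PySem.Str.isIn "_1_" s) <;>
    cases (pvLinesA raw_text).find? (fun s => PySem.Str.isIn "_1" s) <;>
      cases (pvLinesA raw_text).find? (fun s => PySem.Str.isIn "1" s && decide (6 < PySem.Str.len s)) <;>
        simp [pvChoose]
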